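-- pv_equiv track=rewrite | github.com/gitchrisqueen/linkedin_engagement_manager | src/utilities/linked_in_scrapper.py | record_search_word_frequency
-- ===== SOURCE A (Python) =====
-- def record_search_word_frequency(row, si, search_words, search_word_frequency=None):
--     if search_word_frequency is None:
--         search_word_frequency = {}
--
--     # if any of the search words are found in any of the row items record its index in the row to the search word frequency map
--     for word in search_words:
--         if any(word in item for item in row):
--             # Find the index in the row where the word is found
--             word_index = [i for i, item in enumerate(row) if word in item][0]
--             key = 'si:' + str(si) + "fi:" + str(word_index)
--             # Check if key is in search_word_frequency, if not add it
--             if key not in search_word_frequency: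
--                 search_word_frequency[key] = 0
--             # Increase the word frequency by 1
--             search_word_frequency[key] += 1
--     return search_word_frequency
-- ===== SOURCE B (Python) =====
-- def record_search_word_frequency(row, si, search_words, search_word_frequency=None):
--     if search_word_frequency is None:
--         search_word_frequency = {}
--
--     # Pass 1: one enumerate scan of the row builds a table of the FIRST row
--     # index containing each search word.
--     first_index = {}
--     for i, item in enumerate(row):
--         for word in search_words:
--             if word in item and word not in first_index:
--                 first_index[word] = i
--
--     # Pass 2: materialise the key list (one key per occurrence of a found word
--     # in the original search_words list, preserving duplicates) ...
--     keys = ['si:' + str(si) + 'fi:' + str(first_index[word])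
--             for word in search_words if word in first_index]
--
--     # ... and tally it with a get-based counting fold.
--     for key in keys:
--         search_word_frequency[key] = search_word_frequency.get(key, 0) + 1
--     return search_word_frequency
-- ===== Notes on version B (the rewrite author's own statement) =====
-- stated objective: alternative
-- what changed: Replaces A's per-word double scan of the row (any + first-index comprehension) and its contains/init/increment dict update by three staged passes: one enumerate scan building a first-index table, a comprehension materialising the key list, and a get-based counting fold over that list.
import Mathlib
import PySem

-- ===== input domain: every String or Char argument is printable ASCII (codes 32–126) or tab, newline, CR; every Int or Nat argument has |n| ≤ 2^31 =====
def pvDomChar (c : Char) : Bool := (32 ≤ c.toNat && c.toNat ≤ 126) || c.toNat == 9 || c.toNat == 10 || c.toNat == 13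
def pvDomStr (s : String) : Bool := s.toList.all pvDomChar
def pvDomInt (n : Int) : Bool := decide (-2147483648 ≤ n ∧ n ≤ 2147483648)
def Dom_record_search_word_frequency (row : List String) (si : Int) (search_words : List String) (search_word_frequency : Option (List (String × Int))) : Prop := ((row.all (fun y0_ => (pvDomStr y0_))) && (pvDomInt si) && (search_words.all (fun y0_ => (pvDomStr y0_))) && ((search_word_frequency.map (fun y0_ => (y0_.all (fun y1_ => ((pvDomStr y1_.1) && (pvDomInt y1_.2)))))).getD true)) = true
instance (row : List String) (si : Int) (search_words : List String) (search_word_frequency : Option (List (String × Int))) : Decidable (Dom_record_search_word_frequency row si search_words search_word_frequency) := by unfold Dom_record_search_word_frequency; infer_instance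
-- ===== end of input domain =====

-- B replaces A's per-word rescan of the row and its contains/init/increment dict update by three
-- staged passes: an enumerate scan building a first-index table, a comprehension materialising the
-- key list, and a get-based counting fold (objective: alternative decomposition).
-- A mutates a passed-in search_word_frequency dict in place (B does the same); the equivalence
-- proved here is about the RETURN value.

-- ===== PORT A =====
-- Python A: for each word, scan the row (any + first-index comprehension), then update the dict.
def record_search_word_frequency (row : List String) (si : Int) (search_words : List String) (search_word_frequency : Option (List (String × Int))) : List (String × Int) :=
  (search_words.foldl (fun d word =>
    if row.any (fun item => PySem.Str.isIn word item) then
      -- [i for i, item in enumerate(row) if word in item][0]  (the guard makes the list nonempty)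
      let word_index : Int :=
        (((PySem.List.enumerate row 0).filter (fun p => PySem.Str.isIn word p.2)).map (fun p => p.1)).headD 0
      let key := "si:" ++ PySem.Int.toStr si ++ "fi:" ++ PySem.Int.toStr word_index
      let d := if d.contains key = false then d.insert key 0 else d
      d.modify key 0 (· + 1)
    else d) (PySem.Dict.ofList (search_word_frequency.getD []))).items

-- ===== PORT B =====
-- Python B: enumerate pass building first_index, then the key-list comprehension, then the tally.
def record_search_word_frequency_alt (row : List String) (si : Int) (search_words : List String) (search_word_frequency : Option (List (String × Int))) : List (String × Int) :=
  let first_index : PySem.Dict String Int :=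
    (PySem.List.enumerate row 0).foldl (fun fi p =>
      search_words.foldl (fun fi word =>
        if PySem.Str.isIn word p.2 && !(fi.contains word) then fi.insert word p.1 else fi) fi)
      PySem.Dict.empty
  let keys : List String :=
    search_words.filterMap (fun word =>
      (first_index.get? word).map (fun i => "si:" ++ PySem.Int.toStr si ++ "fi:" ++ PySem.Int.toStr i))
  (keys.foldl (fun d key => d.insert key (d.getD key 0 + 1))
    (PySem.Dict.ofList (search_word_frequency.getD []))).items

-- ===== PRECONDITION & SPEC =====
def Spec_record_search_word_frequency (row : List String) (si : Int) (search_words : List String) (search_word_frequency : Option (List (String × Int))) (out : List (String × Int)) : Prop := out = record_search_word_frequency_alt row si search_words search_word_frequency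
instance (row : List String) (si : Int) (search_words : List String) (search_word_frequency : Option (List (String × Int))) (out : List (String × Int)) : Decidable (Spec_record_search_word_frequency row si search_words search_word_frequency out) := by unfold Spec_record_search_word_frequency; infer_instance

-- ===== CLAIM (what is proved, stated in full; the proofs are below) =====
def Claim_equal_record_search_word_frequency : Prop := ∀ (row : List String) (si : Int) (search_words : List String) (search_word_frequency : Option (List (String × Int))), Dom_record_search_word_frequency row si search_words search_word_frequency → Spec_record_search_word_frequency row si search_words search_word_frequency (record_search_word_frequency row si search_words search_word_frequency)

-- ===== LEMMAS AND PROOFS =====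

-- A fold over a filterMap is a fold over the source list that skips the 'none' elements.
theorem foldl_filterMap {α β γ : Type} (l : List α) (f : α → Option β) (g : γ → β → γ) (init : γ) :
    (l.filterMap f).foldl g init
      = l.foldl (fun acc a => match f a with | some b => g acc b | none => acc) init := by
  induction l generalizing init with
  | nil => rfl
  | cons a l ih =>
    rw [List.filterMap_cons]
    cases hfa : f a <;> simp [hfa, ih]

-- A's contains/init/increment update collapses to B's counting step (modify is insert∘getD).
theorem update_step_eq (d : PySem.Dict String Int) (k : String) :
    (if d.contains k = false then d.insert k 0 else d).modify k 0 (· + 1)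
      = d.insert k (d.getD k 0 + 1) := by
  by_cases hc : d.contains k = true
  · simp [hc, PySem.Dict.modify]
  · rw [Bool.not_eq_true] at hc
    rw [if_pos hc]
    show (d.insert k 0).insert k ((d.insert k 0).getD k 0 + 1) = _
    rw [PySem.Dict.insert_insert_self, PySem.Dict.getD_insert_self,
      PySem.Dict.getD_of_not_contains _ _ hc]

-- The inner (per-row-item) loop of B's table pass, read through get?.
-- (Generic in the containment test g so that simp cannot unfold it.)
theorem fi_inner_get? (g : String → String → Bool) (words : List String) (p : Int × String)
    (fi : PySem.Dict String Int) (w : String) :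
    (words.foldl (fun fi word =>
        if g word p.2 && !(fi.contains word) then fi.insert word p.1 else fi) fi).get? w
      = (fi.get? w).or (if w ∈ words ∧ g w p.2 then some p.1 else none) := by
  induction words generalizing fi with
  | nil => simp
  | cons word ws ih =>
    simp only [List.foldl_cons, ih]
    by_cases hw : w = word
    · subst hw
      rcases hfi : fi.get? w with _ | v
      · have hc : fi.contains w = false := by
          rw [PySem.Dict.contains_eq_isSome_get?, hfi]; rfl
        by_cases hin : g w p.2 = true
        · simp [hin, hc, Option.or]
        · simp [hin, hc, hfi]
      · have hc : fi.contains w = true := by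
          rw [PySem.Dict.contains_eq_isSome_get?, hfi]; rfl
        by_cases hin : g w p.2 = true <;> simp [hin, hc, hfi, Option.or]
    · have hstep : ∀ fi' : PySem.Dict String Int,
          (if g word p.2 && !(fi'.contains word) then fi'.insert word p.1 else fi').get? w
            = fi'.get? w := by
        intro fi'; split
        · rw [PySem.Dict.get?_insert]; simp [hw]
        · rfl
      rw [hstep]
      have hmem : (w ∈ word :: ws ∧ g w p.2 = true) ↔ (w ∈ ws ∧ g w p.2 = true) := by
        simp [hw]
      simp only [hmem]

-- The outer (row) loop of B's table pass: get? w yields the first index whose item contains w.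
theorem fi_outer_get? (g : String → String → Bool) (ps : List (Int × String)) (words : List String)
    (fi : PySem.Dict String Int) (w : String) (hw : w ∈ words) :
    (ps.foldl (fun fi p =>
        words.foldl (fun fi word =>
          if g word p.2 && !(fi.contains word) then fi.insert word p.1 else fi) fi) fi).get? w
      = (fi.get? w).or ((ps.find? (fun p => g w p.2)).map (fun p => p.1)) := by
  induction ps generalizing fi with
  | nil => simp
  | cons p ps ih =>
    simp only [List.foldl_cons, ih, fi_inner_get? g words p fi w]
    rw [List.find?_cons]
    by_cases hin : g w p.2 = true
    · simp [hin, hw]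
    · simp [hin]

-- First occurrence via filter/map/headD equals find?'s index.
theorem headD_filter_map (ps : List (Int × String)) (q : Int × String → Bool) (p : Int × String)
    (h : ps.find? q = some p) :
    ((ps.filter q).map (fun r => r.1)).headD 0 = p.1 := by
  have h1 : (ps.filter q).head? = some p := by rw [List.head?_filter, h]
  simp [List.headD_eq_head?_getD, List.head?_map, h1]

-- A's guard row.any equals "find? on the enumerated row succeeds".
theorem any_eq_enum_find? (g : String → String → Bool) (row : List String) (w : String) :
    row.any (fun item => g w item)
      = ((PySem.List.enumerate row 0).find? (fun p => g w p.2)).isSome := by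
  have h0 : row.any (fun item => g w item)
      = ((PySem.List.enumerate row 0).map (fun p => p.2)).any (fun item => g w item) := by
    rw [PySem.List.map_snd_enumerate]
  rw [h0, List.any_map]
  rcases hf : (PySem.List.enumerate row 0).find? (fun p => g w p.2) with _ | p
  · rw [hf]
    rw [List.find?_eq_none] at hf
    simp only [Option.isSome_none, List.any_eq_false]
    intro x hx; simpa using hf x hx
  · rw [hf]
    simp only [Option.isSome_some, List.any_eq_true]
    exact ⟨p, List.mem_of_find?_eq_some hf, by simpa using List.find?_some hf⟩

-- ===== VERDICT (by name: the statement is the Claim_ definition above) =====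
theorem record_search_word_frequency_spec : Claim_equal_record_search_word_frequency := by
  intro row si search_words search_word_frequency _
  unfold Spec_record_search_word_frequency record_search_word_frequency record_search_word_frequency_alt
  simp only
  rw [foldl_filterMap]
  congr 1
  apply PySem.List.foldl_congr_mem'
  intro word hword d
  rw [fi_outer_get? (fun w item => PySem.Str.isIn w item) (PySem.List.enumerate row 0)
        search_words PySem.Dict.empty word hword]
  rw [any_eq_enum_find? (fun w item => PySem.Str.isIn w item) row word]
  rcases hf : (PySem.List.enumerate row 0).find? (fun p => PySem.Str.isIn word p.2) with _ | p
  · rw [hf]; rfl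
  · rw [hf, headD_filter_map _ _ _ hf]
    simp only [Option.isSome_some, if_true, PySem.Dict.get?_empty, Option.or, Option.map_some]
    exact update_step_eq d _
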